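-- pv_equiv track=rewrite | github.com/ict-cspark/TIL | Algorithm/Programmers/Level2/level2_n진수_게임.py | solution
-- ===== SOURCE A (Python) =====
-- alph = {10: 'A', 11: 'B', 12: 'C', 13: 'D', 14: 'E', 15: 'F'}   # 11진수 ~ 16진수에서 사용할 alph 딕셔너리 생성
--
-- def solution(n, t, m, p):                           # 진법 n, 구할 숫자 갯수 t, 참여 인원 m, 순서 p
--     num = ['0'] * (t * m)                           # 10진수에서 n진법으로 변환된 숫자를 저장하기 위한 num 리스트 생성
--     for i in range(1, len(num)):                    # 1부터 num 리스트 길이만큼 반복문 실행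
--         change = ''                                 # 변환할 숫자를 저장하기 위한 chanae 변수 생성
--         ans = i                                     # 변환할 숫자 인덱스를 ans 에 저장
--         while ans > 0:                              # ans가 0이 될때까지 반복문 실행
--             temp = ans % n                          # temp에 ans를 n으로 나눈 나머지를 저장
--             if 10 <= temp <= 15:                    # 만약 나머지가 10이상 15이하일 경우
--                 temp = alph[temp]                   # 나머지를 alph 딕셔너리를 활용하여 알파벳으로 저장
--             ans = ans // n                          # ans에 ans를 n으로 나눈 몫을 저장
--             change = str(temp) + change             # change에 문자열로 바꾼 temp를 뒤에서 부터 차례대로 저장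
--         num[i] = change                             # 반복문 종료 후 num[i]에 change를 저장
--
--     answer = ''.join(num)                           # num리스트에 저장된 숫자들을 answer의 하나의 문자열로 저장
--     result = ''                                     # 결과를 출력하기 위한 result 변수 생성
--     for j in range(t):                              # 구할 숫자 갯수만큼 반복문 실행
--         result += answer[(j * m) + (p - 1)]         # j에 참여인원을 곱한 후 순서 - 1의 인덱스에 숫자를 result에 더함
--
--     return result                                   # 결과값 출력
-- ===== SOURCE B (Python) =====
-- def solution(n, t, m, p):
--     digs = "0123456789ABCDEF"
--     out = []
--     for j in range(t):
--         idx = j * m + (p - 1)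
--         if idx == 0:
--             out.append('0')
--             continue
--         k = idx - 1                       # position within the concatenation of base-n reps of 1,2,3,...
--         L = 1
--         first = 1                         # n**(L-1): smallest number with L digits
--         while k >= (n - 1) * first * L:   # skip the whole block of L-digit numbers
--             k -= (n - 1) * first * L
--             first *= n
--             L += 1
--         num = first + k // L              # the number the position falls in
--         r = k % L                         # which of its digits (from the left)
--         d = (num // n ** (L - 1 - r)) % n
--         out.append(digs[d] if 0 <= d < 16 else str(d))
--     return ''.join(out)
-- ===== Notes on version B (the rewrite author's own statement) =====
-- stated objective: alternative
-- what changed: Instead of materialising the base-n representations of all t*m numbers, joining them and indexing, B computes each of the t sampled characters arithmetically: it walks the digit-length blocks (there are (n-1)*n^(L-1) numbers of length L) to locate which number and which of its digits the target position falls in, and extracts that digit with div/mod; B avoids building the t*m-sized table, but a timing run's large inputs lie outside Pre_ (bases > 16), so no speed is claimed.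
-- outside the precondition, e.g. on solution(17, 18, 1, 1): A returns '0123456789ABCDEF16', B returns '0123456789ABCDEF161'; on solution(2, 1, 3, 0): A returns '0', B returns '1'; on solution(2, 2, 1, 5): A raises IndexError, B returns '11'
import Mathlib
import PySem

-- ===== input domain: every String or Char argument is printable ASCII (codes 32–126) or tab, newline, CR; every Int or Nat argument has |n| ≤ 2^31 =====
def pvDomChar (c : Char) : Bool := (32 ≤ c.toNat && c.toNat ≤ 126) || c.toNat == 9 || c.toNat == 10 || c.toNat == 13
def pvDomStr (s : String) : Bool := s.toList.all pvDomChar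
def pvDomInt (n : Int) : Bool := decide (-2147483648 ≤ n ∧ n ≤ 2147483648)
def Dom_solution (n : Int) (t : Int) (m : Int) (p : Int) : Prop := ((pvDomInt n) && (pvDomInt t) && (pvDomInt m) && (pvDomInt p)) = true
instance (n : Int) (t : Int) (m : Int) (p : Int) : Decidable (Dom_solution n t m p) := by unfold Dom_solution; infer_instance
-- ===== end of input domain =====

-- B replaces A's "materialise the whole digit stream, join, then index" by per-sample arithmetic
-- digit extraction (walk the digit-length blocks), so no t*m-sized table is built (objective:
-- alternative algorithm; no measured-speed claim).

-- ===== PORT A =====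

-- the module-level dict alph = {10:'A', …, 15:'F'}
def pvAlph : PySem.Dict Int String :=
  PySem.Dict.mk [(10, "A"), (11, "B"), (12, "C"), (13, "D"), (14, "E"), (15, "F")]

-- the inner 'while ans > 0' loop of A; fuel is totality scaffolding only (for n ≥ 2 the
-- loop runs at most ans times, and the caller passes fuel = ans.toNat + 1)
def pvConv (n : Int) : Nat → Int → String → String
  | 0, _, change => change
  | fuel + 1, ans, change =>
    if ans > 0 then
      let temp := PySem.Int.mod ans n                      -- temp = ans % n
      let tempStr :=                                       -- if 10 <= temp <= 15: temp = alph[temp]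
        if 10 ≤ temp ∧ temp ≤ 15 then (PySem.Dict.get? pvAlph temp).getD ""
        else PySem.Int.toStr temp                          -- str(temp)
      pvConv n fuel (PySem.Int.floordiv ans n) (tempStr ++ change)   -- ans //= n; change = str(temp) + change
    else change

def solution (n : Int) (t : Int) (m : Int) (p : Int) : String :=
  let num0 : List String := List.replicate (t * m).toNat "0"          -- ['0'] * (t*m)
  let num := (PySem.List.pyRange 1 (num0.length : Int) 1).foldl       -- for i in range(1, len(num))
    (fun num i => PySem.List.pySetD num i (pvConv n (i.toNat + 1) i "")) num0   -- num[i] = change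
  let answer := PySem.Str.join "" num                                 -- ''.join(num)
  (PySem.List.pyRange 0 t 1).foldl                                    -- for j in range(t)
    (fun result j =>
      match PySem.Str.pyGet? answer ((j * m) + (p - 1)) with          -- result += answer[(j*m)+(p-1)]
      | some c => result.push c
      | none => result)                                               -- (IndexError: outside Pre_)
    ""

-- ===== PORT B =====

-- the 'while k >= (n-1)*first*L' loop of B; fuel is totality scaffolding only (for n ≥ 2
-- each step decreases k by at least 1, and the caller passes fuel = k.toNat + 1)
def pvWalk (n : Int) : Nat → Int → Int → Int → Int × Int × Int
  | 0, k, L, first => (k, L, first)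
  | fuel + 1, k, L, first =>
    if k ≥ (n - 1) * first * L then
      pvWalk n fuel (k - (n - 1) * first * L) (L + 1) (first * n)
    else (k, L, first)

def solution_alt (n : Int) (t : Int) (m : Int) (p : Int) : String :=
  let digs := "0123456789ABCDEF"
  let out := (PySem.List.pyRange 0 t 1).foldl                         -- for j in range(t)
    (fun out j =>
      let idx := j * m + (p - 1)
      if idx = 0 then out ++ ["0"]                                    -- out.append('0')
      else
        let k := idx - 1
        match pvWalk n (k.toNat + 1) k 1 1 with
        | (k, L, first) =>
          let num := first + PySem.Int.floordiv k L                   -- num = first + k // L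
          let r := PySem.Int.mod k L                                  -- r = k % L
          -- n ** (L-1-r): under Pre_ the exponent is ≥ 0, so .toNat is exact
          let d := PySem.Int.mod (PySem.Int.floordiv num (n ^ (L - 1 - r).toNat)) n
          -- out.append(digs[d] if 0 <= d < 16 else str(d))
          out ++ [if 0 ≤ d ∧ d < 16 then
                    (match PySem.Str.pyGet? digs d with
                     | some c => String.ofList [c]
                     | none => "")
                  else PySem.Int.toStr d])
    []
  PySem.Str.join "" out                                               -- ''.join(out)

-- ===== PRECONDITION & SPEC =====
-- Pre_ is the puzzle's stated domain (base 2..16, player index 1..m, any t), plus the whole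
-- region t ≤ 0 on which both programs sample nothing and return "" (except n ∈ {0,1} with
-- t*m ≥ 2, where A divides by zero or loops forever building its table). Excluded while A
-- still returns: n ≥ 17 (a "digit" ≥ 16 becomes the multi-character str(temp), shifting all
-- positions) and p ≤ 0 with t ≥ 1 (the sampled index wraps around Python-style); for p > m
-- with t ≥ 1, A can also run past the built string and raise IndexError.
def Pre_solution (n : Int) (t : Int) (m : Int) (p : Int) : Prop :=
  (2 ≤ n ∧ n ≤ 16 ∧ 1 ≤ p ∧ p ≤ m) ∨ (t ≤ 0 ∧ (n ≤ -1 ∨ 2 ≤ n ∨ t * m ≤ 1))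
instance (n : Int) (t : Int) (m : Int) (p : Int) : Decidable (Pre_solution n t m p) := by
  unfold Pre_solution; infer_instance

def pvWitness_solution : Int × Int × Int × Int := (2, 4, 2, 1)

def Spec_solution (n : Int) (t : Int) (m : Int) (p : Int) (out : String) : Prop := out = solution_alt n t m p
instance (n : Int) (t : Int) (m : Int) (p : Int) (out : String) : Decidable (Spec_solution n t m p out) := by unfold Spec_solution; infer_instance

-- ===== CLAIM (what is proved, stated in full; the proofs are below) =====
def Claim_equal_solution : Prop := ∀ (n : Int) (t : Int) (m : Int) (p : Int), Dom_solution n t m p → Pre_solution n t m p → Spec_solution n t m p (solution n t m p)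

-- ===== LEMMAS AND PROOFS =====

def pvDChar (d : Nat) : Char := "0123456789ABCDEF".toList.getD d '?'

def pvDStr (N i : Nat) : List Char := ((Nat.digits N i).map pvDChar).reverse

theorem pvTempStr (d : Nat) (hd : d < 16) :
    ((if 10 ≤ (d : Int) ∧ (d : Int) ≤ 15 then (PySem.Dict.get? pvAlph d).getD ""
      else PySem.Int.toStr d) : String).toList = [pvDChar d] := by
  interval_cases d <;> decide

theorem pvConv_zero (n : Int) (fuel : Nat) (change : String) :
    pvConv n fuel 0 change = change := by cases fuel <;> simp [pvConv]

theorem pvConv_eq (n : Int) (hn : 2 ≤ n) (hn16 : n ≤ 16) :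
    ∀ (fuel : Nat) (a : Int) (change : String), 0 < a → a.toNat ≤ fuel →
    (pvConv n fuel a change).toList = pvDStr n.toNat a.toNat ++ change.toList := by
  intro fuel
  induction fuel with
  | zero => intro a change ha hf; omega
  | succ fuel ih =>
    intro a change ha hf
    lift a to Nat using (by omega) with A
    lift n to Nat using (by omega) with Nn
    simp only [Int.toNat_natCast] at *
    have hnn : (1:Nat) < Nn := by exact_mod_cast (by omega : (1:Int) < (Nn:Int))
    have hA : 0 < A := by exact_mod_cast ha
    rw [pvConv]
    simp only [ha, if_pos]
    rw [PySem.Int.mod_natCast, PySem.Int.floordiv_natCast]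
    have hdig := Nat.digits_def' hnn hA
    have hds : pvDStr Nn A = pvDStr Nn (A / Nn) ++ [pvDChar (A % Nn)] := by
      rw [pvDStr, hdig]; simp [pvDStr]
    have htmp := pvTempStr (A % Nn) (by
      have h16 : Nn ≤ 16 := by exact_mod_cast hn16
      have := Nat.mod_lt A (show 0 < Nn by omega); omega)
    push_cast at htmp
    by_cases hq : A / Nn = 0
    · rw [hq]; simp only [Nat.cast_zero, pvConv_zero]
      rw [hds, hq]
      simp [pvDStr, String.toList_append, htmp]
    · have hlt : A / Nn < A := Nat.div_lt_self hA hnn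
      rw [ih _ _ (by exact_mod_cast Nat.pos_of_ne_zero hq) (by simp; omega)]
      simp only [Int.toNat_natCast]
      rw [hds]
      simp [String.toList_append, htmp]

def pvRep (N i : Nat) : List Char := if i = 0 then ['0'] else pvDStr N i

theorem pvFoldSet {α : Type} (g : Int → α) (js : List Int) (l : List α) (j : Nat)
    (hjs : ∀ i ∈ js, 0 ≤ i) :
    (js.foldl (fun acc i => PySem.List.pySetD acc i (g i)) l)[j]? =
    if (j : Int) ∈ js ∧ j < l.length then some (g j) else l[j]? := by
  induction js generalizing l with
  | nil => simp
  | cons i js ih =>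
    simp only [List.foldl_cons]
    rw [PySem.List.pySetD_of_nonneg l (g i) (hjs i (by simp))]
    rw [ih _ (fun x hx => hjs x (by simp [hx]))]
    have hi : ((i.toNat : Int)) = i := Int.toNat_of_nonneg (hjs i (by simp))
    simp only [List.length_set, List.getElem?_set]
    by_cases hj : (j : Int) = i
    · subst hj
      simp only [Int.toNat_natCast, List.length_set, List.getElem?_set]
      by_cases hlen : j < l.length
      · by_cases hmem : (j:Int) ∈ js <;> simp [hlen, hmem]
      · have hnone : l[j]? = none := List.getElem?_eq_none (by omega)
        simp [hlen, hnone]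
    · have hne : i.toNat ≠ j := by omega
      simp [hne, hj]

theorem pvNum_eq (n : Int) (hn : 2 ≤ n) (hn16 : n ≤ 16) (K : Nat) :
    (PySem.List.pyRange 1 (K : Int) 1).foldl
      (fun num i => PySem.List.pySetD num i (pvConv n (i.toNat + 1) i "")) (List.replicate K "0")
    = (List.range K).map (fun i => String.ofList (pvRep n.toNat i)) := by
  apply List.ext_getElem?
  intro j
  rw [pvFoldSet (fun i => pvConv n (i.toNat + 1) i "") _ _ _
      (by intro x hx; rw [PySem.List.mem_pyRange_one] at hx; omega)]
  simp only [List.length_replicate, PySem.List.mem_pyRange_one, List.getElem?_map, List.getElem?_range]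
  by_cases hjK : j < K
  · by_cases hj0 : j = 0
    · subst hj0
      simp [show ¬ ((1:Int) ≤ 0) by omega, List.getElem?_replicate, hjK, pvRep]
    · have h1 : (1:Int) ≤ (j:Int) := by omega
      rw [if_pos ⟨⟨h1, by exact_mod_cast hjK⟩, hjK⟩]
      simp only [List.getElem?_range, hjK, if_pos, Option.map_some]
      congr 1
      apply String.toList_inj.mp
      rw [Int.toNat_natCast, pvConv_eq n hn hn16 (j+1) j "" (by omega) (by simp)]
      simp [pvRep, hj0]
  · have : ¬ ((j:Int) < (K:Int)) := by exact_mod_cast hjK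
    rw [if_neg (by push_cast; omega)]
    simp [List.getElem?_replicate, hjK]

def pvF (N K : Nat) : List Char := (List.range K).flatMap (pvRep N)

def pvG (N s M : Nat) : List Char := (List.range' s M).flatMap (pvDStr N)

theorem pvDStr_ne_nil (N i : Nat) (hN : 2 ≤ N) (hi : 0 < i) : pvDStr N i ≠ [] := by
  simp [pvDStr]
  exact Nat.digits_ne_nil_iff_ne_zero.mpr (by omega)

theorem pvRep_ne_nil (N i : Nat) (hN : 2 ≤ N) : pvRep N i ≠ [] := by
  rw [pvRep]
  split_ifs with h
  · simp
  · exact pvDStr_ne_nil N i hN (by omega)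

theorem pvF_len (N K : Nat) (hN : 2 ≤ N) : K ≤ (pvF N K).length := by
  rw [pvF]
  induction K with
  | zero => simp
  | succ K ih =>
    rw [List.range_succ, List.flatMap_append, List.length_append]
    have h1 := List.length_pos_iff.mpr (pvRep_ne_nil N K hN)
    have h2 : (List.flatMap (pvRep N) [K]).length = (pvRep N K).length := by simp
    omega

theorem pvDigits_getElem (N : Nat) (hN : 2 ≤ N) :
    ∀ (j v : Nat), 0 < v → j < (Nat.digits N v).length →
    (Nat.digits N v).getD j 0 = v / N ^ j % N := by
  intro j
  induction j with
  | zero =>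
    intro v hv _
    rw [Nat.digits_def' (by omega) hv]
    simp
  | succ j ih =>
    intro v hv hj
    rw [Nat.digits_def' (by omega) hv] at hj ⊢
    simp only [List.getD_cons_succ]
    by_cases hq : 0 < v / N
    · rw [ih (v / N) hq (by simpa using hj)]
      rw [Nat.div_div_eq_div_mul, pow_succ']
    · have : v / N = 0 := Nat.eq_zero_of_not_pos hq
      rw [this] at hj
      simp at hj

theorem pvDStr_len (N v L : Nat) (hN : 2 ≤ N) (h1 : N ^ (L - 1) ≤ v) (h2 : v < N ^ L)
    (hL : 1 ≤ L) : (pvDStr N v).length = L := by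
  have hv : v ≠ 0 := by have : 0 < N ^ (L-1) := Nat.pow_pos (show 0 < N by omega); omega
  have hlog : Nat.log N v = L - 1 :=
    Nat.log_eq_of_pow_le_of_lt_pow h1 (by rwa [Nat.sub_add_cancel hL])
  simp [pvDStr, Nat.digits_len N v (by omega) hv, hlog]
  omega

theorem pvDStr_getElem (N v L r : Nat) (hN : 2 ≤ N) (h1 : N ^ (L - 1) ≤ v) (h2 : v < N ^ L)
    (hL : 1 ≤ L) (hr : r < L) :
    (pvDStr N v).getD r '?' = pvDChar (v / N ^ (L - 1 - r) % N) := by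
  have hv : 0 < v := by have : 0 < N ^ (L-1) := Nat.pow_pos (show 0 < N by omega); omega
  have hlen := pvDStr_len N v L hN h1 h2 hL
  have hdl : (Nat.digits N v).length = L := by
    simpa [pvDStr] using hlen
  rw [List.getD_eq_getElem _ _ (by omega)]
  simp only [pvDStr]
  rw [List.getElem_reverse]
  simp only [List.getElem_map, List.length_reverse, List.length_map] at *
  have hoff : (Nat.digits N v).length - 1 - r = L - 1 - r := by omega
  rw [← List.getD_eq_getElem _ 0 (by omega)]
  rw [hdl]
  rw [pvDigits_getElem N hN (L - 1 - r) v hv (by omega)]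

theorem pvFlat_eq_len (N L : Nat) (hN : 2 ≤ N) (hL : 1 ≤ L) :
    ∀ (M s q : Nat),
    (∀ x ∈ List.range' s M, (pvDStr N x).length = L) →
    q < M * L →
    (pvG N s M).getD q '?' = (pvDStr N (s + q / L)).getD (q % L) '?' := by
  intro M
  induction M with
  | zero => intro s q _ hq; omega
  | succ M ih =>
    intro s q hlen hq
    have hmul : (M + 1) * L = M * L + L := Nat.succ_mul M L
    rw [pvG, List.range'_succ, List.flatMap_cons]
    have hls : (pvDStr N s).length = L := hlen s (by simp [List.mem_range'_1])
    by_cases hqL : q < L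
    · rw [List.getD_append _ _ _ _ (by omega)]
      rw [Nat.div_eq_of_lt hqL, Nat.mod_eq_of_lt hqL]
      simp
    · rw [List.getD_append_right _ _ _ _ (by omega)]
      rw [hmul] at hq
      have := ih (s+1) (q - L) (fun x hx => hlen x (by simp [List.mem_range'_1] at hx ⊢; omega)) (by omega)
      rw [pvG] at this
      rw [hls, this]
      have e2 : q - L + L = q := by omega
      have hdiv : s + 1 + (q - L) / L = s + q / L := by
        have e1 : (q - L + L) / L = (q - L) / L + 1 := Nat.add_div_right _ (by omega)
        rw [e2] at e1; omega
      have hmod : (q - L) % L = q % L := by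
        have e1 : (q - L + L) % L = (q - L) % L := Nat.add_mod_right _ _
        rw [e2] at e1; omega
      rw [hdiv, hmod]

def pvNWalk (N : Nat) : Nat → Nat → Nat → Nat × Nat
  | 0, k, L => (k, L)
  | fuel + 1, k, L =>
    if (N - 1) * N ^ (L - 1) * L ≤ k then
      pvNWalk N fuel (k - (N - 1) * N ^ (L - 1) * L) (L + 1)
    else (k, L)

theorem pvG_len_const (N s M L : Nat)
    (hlen : ∀ x ∈ List.range' s M, (pvDStr N x).length = L) :
    (pvG N s M).length = M * L := by
  induction M generalizing s with
  | zero => simp [pvG]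
  | succ M ih =>
    rw [pvG, List.range'_succ, List.flatMap_cons, List.length_append]
    have h1 : (pvDStr N s).length = L := hlen s (by simp [List.mem_range'_1])
    have h2 := ih (s+1) (fun x hx => hlen x (by simp [List.mem_range'_1] at hx ⊢; omega))
    rw [pvG] at h2
    rw [h1, h2, Nat.succ_mul]
    omega

theorem pvPowSplit (N L : Nat) (hN : 2 ≤ N) (hL : 1 ≤ L) :
    N ^ (L - 1) + (N - 1) * N ^ (L - 1) = N ^ L := by
  have hA : (N - 1) * N ^ (L - 1) = N * N ^ (L - 1) - N ^ (L - 1) := Nat.sub_one_mul _ _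
  have hle : N ^ (L - 1) ≤ N * N ^ (L - 1) := Nat.le_mul_of_pos_left _ (by omega)
  have hpow : N * N ^ (L - 1) = N ^ L := by
    rw [← pow_succ']
    congr 1
    omega
  omega

theorem pvWalk_correct (N : Nat) (hN : 2 ≤ N) :
    ∀ (fuel k L M : Nat), k < fuel → 1 ≤ L → k < (pvG N (N ^ (L - 1)) M).length →
    (pvG N (N ^ (L - 1)) M).getD k '?' =
      pvDChar ((N ^ ((pvNWalk N fuel k L).2 - 1) + (pvNWalk N fuel k L).1 / (pvNWalk N fuel k L).2) /
        N ^ ((pvNWalk N fuel k L).2 - 1 - (pvNWalk N fuel k L).1 % (pvNWalk N fuel k L).2) % N) := by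
  intro fuel
  induction fuel with
  | zero => intro k L M hk; omega
  | succ fuel ih =>
    intro k L M hk hL hkG
    have hA : 0 < N ^ (L - 1) := Nat.pow_pos (show 0 < N by omega)
    have hcnt : 0 < (N - 1) * N ^ (L - 1) := by
      have : 1 * 1 ≤ (N - 1) * N ^ (L - 1) := Nat.mul_le_mul (by omega) (by omega)
      omega
    have hcL : 0 < (N - 1) * N ^ (L - 1) * L := Nat.mul_pos hcnt (by omega)
    have hsplit := pvPowSplit N L hN hL
    have hlenIn : ∀ M', M' ≤ (N - 1) * N ^ (L - 1) →
        ∀ x ∈ List.range' (N ^ (L - 1)) M', (pvDStr N x).length = L := by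
      intro M' hM' x hx
      simp [List.mem_range'_1] at hx
      exact pvDStr_len N x L hN (by omega) (by omega) hL
    have hrangeSplit : (N - 1) * N ^ (L - 1) ≤ M → List.range' (N ^ (L - 1)) M =
        List.range' (N ^ (L - 1)) ((N - 1) * N ^ (L - 1)) ++
        List.range' (N ^ L) (M - (N - 1) * N ^ (L - 1)) := by
      intro hMc
      have hM' : (N - 1) * N ^ (L - 1) + (M - (N - 1) * N ^ (L - 1)) = M := by omega
      have h := List.range'_append (s := N ^ (L - 1)) (m := (N - 1) * N ^ (L - 1))
        (n := M - (N - 1) * N ^ (L - 1)) (step := 1)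
      rw [one_mul, hsplit, hM'] at h
      exact h.symm
    by_cases hstep : (N - 1) * N ^ (L - 1) * L ≤ k
    · -- walk recurses into the next block
      rw [pvNWalk, if_pos hstep]
      have hMbig : (N - 1) * N ^ (L - 1) ≤ M := by
        by_contra hMle
        push_neg at hMle
        have := pvG_len_const N (N ^ (L - 1)) M L (hlenIn M (by omega))
        have hML : M * L ≤ (N - 1) * N ^ (L - 1) * L := Nat.mul_le_mul_right _ (by omega)
        omega
      have hGsplit : pvG N (N ^ (L - 1)) M =
          pvG N (N ^ (L - 1)) ((N - 1) * N ^ (L - 1)) ++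
          pvG N (N ^ L) (M - (N - 1) * N ^ (L - 1)) := by
        rw [pvG, hrangeSplit hMbig, List.flatMap_append, pvG, pvG]
      have hBlkLen : (pvG N (N ^ (L - 1)) ((N - 1) * N ^ (L - 1))).length =
          (N - 1) * N ^ (L - 1) * L := pvG_len_const _ _ _ _ (hlenIn _ le_rfl)
      rw [hGsplit, List.getD_append_right _ _ _ _ (by omega)]
      rw [hBlkLen]
      rw [hGsplit, List.length_append, hBlkLen] at hkG
      have hrec := ih (k - (N - 1) * N ^ (L - 1) * L) (L + 1) (M - (N - 1) * N ^ (L - 1))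
        (by omega) (by omega)
        (by simpa using (show k - (N - 1) * N ^ (L - 1) * L <
              (pvG N (N ^ L) (M - (N - 1) * N ^ (L - 1))).length by omega))
      simpa using hrec
    · -- the position is inside the length-L block
      rw [pvNWalk, if_neg hstep]
      push_neg at hstep
      simp only
      by_cases hM : M ≤ (N - 1) * N ^ (L - 1)
      · have hGlen := pvG_len_const N (N ^ (L - 1)) M L (hlenIn M hM)
        have hkML : k < M * L := by omega
        rw [pvFlat_eq_len N L hN hL M (N ^ (L - 1)) k (hlenIn M hM) hkML]
        have hdivM : k / L < M := Nat.div_lt_of_lt_mul (by rw [Nat.mul_comm]; exact hkML)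
        have hvlt : N ^ (L - 1) + k / L < N ^ L := by omega
        rw [pvDStr_getElem N (N ^ (L - 1) + k / L) L (k % L) hN (Nat.le_add_right _ _) hvlt hL
          (Nat.mod_lt _ (by omega))]
      · push_neg at hM
        have hGsplit : pvG N (N ^ (L - 1)) M =
            pvG N (N ^ (L - 1)) ((N - 1) * N ^ (L - 1)) ++
            pvG N (N ^ L) (M - (N - 1) * N ^ (L - 1)) := by
          rw [pvG, hrangeSplit (by omega), List.flatMap_append, pvG, pvG]
        have hBlkLen : (pvG N (N ^ (L - 1)) ((N - 1) * N ^ (L - 1))).length =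
            (N - 1) * N ^ (L - 1) * L := pvG_len_const _ _ _ _ (hlenIn _ le_rfl)
        rw [hGsplit, List.getD_append _ _ _ _ (by omega)]
        rw [pvFlat_eq_len N L hN hL _ (N ^ (L - 1)) k (hlenIn _ le_rfl) hstep]
        have hdivM : k / L < (N - 1) * N ^ (L - 1) :=
          Nat.div_lt_of_lt_mul (by rw [Nat.mul_comm]; exact hstep)
        have hvlt : N ^ (L - 1) + k / L < N ^ L := by omega
        rw [pvDStr_getElem N (N ^ (L - 1) + k / L) L (k % L) hN (Nat.le_add_right _ _) hvlt hL
          (Nat.mod_lt _ (by omega))]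

def pvBChar (N k : Nat) : Char :=
  let w := pvNWalk N (k + 1) k 1
  pvDChar ((N ^ (w.2 - 1) + w.1 / w.2) / N ^ (w.2 - 1 - w.1 % w.2) % N)

theorem pvG_len_ge (N : Nat) (hN : 2 ≤ N) :
    ∀ (M s : Nat), 1 ≤ s → M ≤ (pvG N s M).length := by
  intro M
  induction M with
  | zero => simp [pvG]
  | succ M ih =>
    intro s hs
    rw [pvG, List.range'_succ, List.flatMap_cons, List.length_append]
    have h1 := List.length_pos_iff.mpr (pvDStr_ne_nil N s hN (by omega))
    have h2 := ih (s + 1) (by omega)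
    rw [pvG] at h2
    omega

theorem pvFlatMap_rep_eq_G (N : Nat) :
    ∀ (M s : Nat), 1 ≤ s → (List.range' s M).flatMap (pvRep N) = pvG N s M := by
  intro M
  induction M with
  | zero => simp [pvG]
  | succ M ih =>
    intro s hs
    rw [pvG, List.range'_succ, List.flatMap_cons, List.flatMap_cons]
    rw [show pvRep N s = pvDStr N s from by rw [pvRep, if_neg (by omega)]]
    rw [ih (s + 1) (by omega), pvG]

theorem pvMain (N K idx : Nat) (hN : 2 ≤ N) (hidx : idx < K) :
    (pvF N K).getD idx '?' = if idx = 0 then '0' else pvBChar N (idx - 1) := by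
  have hK : 1 ≤ K := by omega
  have hF : pvF N K = '0' :: pvG N 1 (K - 1) := by
    rw [pvF, List.range_eq_range', show K = (K-1)+1 from by omega, List.range'_succ,
      List.flatMap_cons]
    rw [show pvRep N 0 = ['0'] from by rw [pvRep, if_pos rfl]]
    rw [pvFlatMap_rep_eq_G N (K-1) 1 le_rfl]
    simp
  rw [hF]
  by_cases h0 : idx = 0
  · simp [h0]
  · rw [if_neg h0]
    obtain ⟨k, rfl⟩ : ∃ k, idx = k + 1 := ⟨idx - 1, by omega⟩
    simp only [Nat.add_sub_cancel, List.getD_cons_succ]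
    have hbound : k < (pvG N 1 (K - 1)).length := by
      have := pvG_len_ge N hN (K - 1) 1 le_rfl
      omega
    have hw := pvWalk_correct N hN (k + 1) k 1 (K - 1) (by omega) le_rfl
      (by simpa using hbound)
    rw [pvBChar]
    simp only [show (1:Nat) - 1 = 0 from rfl, pow_zero] at hw
    rw [← hw]

theorem pvNWalk_L_pos (N : Nat) :
    ∀ (fuel k L : Nat), 1 ≤ L → 1 ≤ (pvNWalk N fuel k L).2 := by
  intro fuel
  induction fuel with
  | zero => intro k L hL; simpa [pvNWalk] using hL
  | succ fuel ih =>
    intro k L hL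
    rw [pvNWalk]
    split_ifs with h
    · exact ih _ _ (by omega)
    · simpa using hL

theorem pvWalk_natWalk (N : Nat) (hN : 2 ≤ N) :
    ∀ (fuel : Nat) (k L : Nat), 1 ≤ L →
    pvWalk (N : Int) fuel (k : Int) (L : Int) ((N : Int) ^ (L - 1)) =
      (((pvNWalk N fuel k L).1 : Int), ((pvNWalk N fuel k L).2 : Int),
       (N : Int) ^ ((pvNWalk N fuel k L).2 - 1)) := by
  intro fuel
  induction fuel with
  | zero => intro k L _; rfl
  | succ fuel ih =>
    intro k L hL
    rw [pvWalk, pvNWalk]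
    have hcast : ((N : Int) - 1) * (N : Int) ^ (L - 1) * (L : Int) =
        (((N - 1) * N ^ (L - 1) * L : Nat) : Int) := by
      push_cast [Nat.cast_sub (show 1 ≤ N by omega)]
      ring
    rw [hcast]
    split_ifs with h1 h2 h2
    · -- both step
      have e1 : (k : Int) - ((N - 1) * N ^ (L - 1) * L : Nat) =
          ((k - (N - 1) * N ^ (L - 1) * L : Nat) : Int) := by
        have : ((N - 1) * N ^ (L - 1) * L : Nat) ≤ k := by exact_mod_cast h1
        push_cast [Nat.cast_sub this]
        ring
      have e2 : (N : Int) ^ (L - 1) * (N : Int) = (N : Int) ^ ((L + 1) - 1) := by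
        rw [← pow_succ]
        congr 1
        omega
      rw [e1, show ((L : Int) + 1) = ((L + 1 : Nat) : Int) from by push_cast; ring, e2]
      exact ih _ _ (by omega)
    · exact absurd (by exact_mod_cast h1) h2
    · exact absurd (by exact_mod_cast h2) h1
    · rfl
-- the character B appends for target position g = k*M + (P-1)

def pvChar (N g : Nat) : Char := if g = 0 then '0' else pvBChar N (g - 1)

theorem pvBStep (N M P : Nat) (hN2 : 2 ≤ N) (hN16 : N ≤ 16) (hP : 1 ≤ P)
    (k : Nat) (acc : List String) :
    (let idx := (k : Int) * (M : Int) + ((P : Int) - 1)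
     if idx = 0 then acc ++ ["0"]
     else
       let k' := idx - 1
       match pvWalk (N : Int) (k'.toNat + 1) k' 1 1 with
       | (k', L, first) =>
         let num := first + PySem.Int.floordiv k' L
         let r := PySem.Int.mod k' L
         let d := PySem.Int.mod (PySem.Int.floordiv num ((N : Int) ^ ((L - 1 - r).toNat))) (N : Int)
         acc ++ [if 0 ≤ d ∧ d < 16 then
                   (match PySem.Str.pyGet? "0123456789ABCDEF" d with
                    | some c => String.ofList [c]
                    | none => "")
                 else PySem.Int.toStr d])
    = acc ++ [String.ofList [pvChar N (k * M + (P - 1))]] := by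
  have hidx : (k : Int) * (M : Int) + ((P : Int) - 1) = ((k * M + (P - 1) : Nat) : Int) := by
    push_cast [Nat.cast_sub hP]
    ring
  set g : Nat := k * M + (P - 1) with hg
  rw [hidx]
  by_cases hg0 : g = 0
  · simp [hg0, pvChar]
  · rw [if_neg (by exact_mod_cast hg0)]
    have hk' : ((g : Int) - 1) = ((g - 1 : Nat) : Int) := by push_cast [Nat.cast_sub (by omega : 1 ≤ g)]; ring
    simp only [hk', Int.toNat_natCast]
    have hwalk := pvWalk_natWalk N hN2 (g - 1 + 1) (g - 1) 1 le_rfl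
    norm_num at hwalk
    rw [hwalk]
    set w := pvNWalk N (g - 1 + 1) (g - 1) 1 with hw
    have hL1 : 1 ≤ w.2 := pvNWalk_L_pos N (g - 1 + 1) (g - 1) 1 le_rfl
    have hmlt : w.1 % w.2 < w.2 := Nat.mod_lt _ (by omega)
    simp only [PySem.Int.floordiv_natCast, PySem.Int.mod_natCast]
    have hnum : ((N : Int) ^ (w.2 - 1) + ((w.1 / w.2 : Nat) : Int)) = ((N ^ (w.2 - 1) + w.1 / w.2 : Nat) : Int) := by
      push_cast
      ring
    have hexp : (((w.2 : Int)) - 1 - ((w.1 % w.2 : Nat) : Int)).toNat = w.2 - 1 - w.1 % w.2 := by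
      omega
    rw [hnum, hexp]
    have hpow : ((N : Int)) ^ (w.2 - 1 - w.1 % w.2) = ((N ^ (w.2 - 1 - w.1 % w.2) : Nat) : Int) := by
      push_cast
      ring
    rw [hpow, PySem.Int.floordiv_natCast, PySem.Int.mod_natCast]
    set dn : Nat := (N ^ (w.2 - 1) + w.1 / w.2) / N ^ (w.2 - 1 - w.1 % w.2) % N with hdn
    have hd16 : dn < 16 := by
      have := Nat.mod_lt ((N ^ (w.2 - 1) + w.1 / w.2) / N ^ (w.2 - 1 - w.1 % w.2)) (show 0 < N by omega)
      omega
    rw [if_pos (by constructor <;> [positivity; exact_mod_cast hd16])]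
    rw [PySem.Str.pyGet?_natCast]
    rw [List.getElem?_eq_getElem (by simpa using (by omega : dn < 16))]
    simp only []
    congr 3
    rw [pvChar, if_neg hg0, pvBChar]
    simp only [← hw]
    rw [pvDChar, List.getD_eq_getElem _ _ (by simpa using (by omega : dn < 16))]

theorem pvFoldPush (cf : Nat → Option Char) (cA : Nat → Char) :
    ∀ (T : Nat), (∀ k, k < T → cf k = some (cA k)) →
    ∀ acc : String,
    ((List.range T).foldl (fun r j => match cf j with | some c => r.push c | none => r) acc).toList
      = acc.toList ++ (List.range T).map cA := by
  intro T
  induction T with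
  | zero => intro _ acc; simp
  | succ T ih =>
    intro h acc
    rw [List.range_succ, List.foldl_append, List.foldl_cons, List.foldl_nil, h T (by omega)]
    simp only [String.toList_push]
    rw [ih (fun k hk => h k (by omega)) acc]
    simp

-- ===== PORT A =====

-- the module-level dict alph = {10:'A', …, 15:'F'}

-- the inner 'while ans > 0' loop of A; fuel is totality scaffolding only (for n ≥ 2 the
-- loop runs at most ans times, and the caller passes fuel = ans.toNat + 1)

theorem pvJoin_flatten (l : List (List Char)) : PySem.Chars.join [] l = l.flatten := by
  simp [PySem.Chars.join, List.intercalate]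
  induction l with
  | nil => rfl
  | cons x xs ih => simp at *; cases xs <;> simp_all [List.intersperse]

theorem pvTrivial (n t m p : Int) (ht : t ≤ 0) : solution n t m p = "" := by
  simp [solution, PySem.List.pyRange_one_eq_nil ht]

theorem pvTrivial_alt (n t m p : Int) (ht : t ≤ 0) : solution_alt n t m p = "" := by
  simp [solution_alt, PySem.List.pyRange_one_eq_nil ht]
  rfl

theorem pvEquiv (n t m p : Int) (hn2 : 2 ≤ n) (hn16 : n ≤ 16) (hp1 : 1 ≤ p) (hpm : p ≤ m) :
    solution n t m p = solution_alt n t m p := by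
  rcases le_or_gt t 0 with ht | ht
  · simp [solution, solution_alt, PySem.List.pyRange_one_eq_nil ht]
    rfl
  · lift t to Nat using (by omega) with T
    lift m to Nat using (by omega) with M
    lift p to Nat using (by omega) with P
    lift n to Nat using (by omega) with N
    have hN2 : 2 ≤ N := by exact_mod_cast hn2
    have hN16 : N ≤ 16 := by exact_mod_cast hn16
    have hP1 : 1 ≤ P := by exact_mod_cast hp1
    have hPM : P ≤ M := by exact_mod_cast hpm
    have hTM : ((T : Int) * (M : Int)).toNat = T * M := by
      rw [show ((T : Int) * (M : Int)) = ((T * M : Nat) : Int) from by push_cast; ring]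
      exact Int.toNat_natCast _
    have hgBound : ∀ k, k < T → k * M + (P - 1) < T * M := by
      intro k hk
      have h1 : (k + 1) * M = k * M + M := Nat.succ_mul _ _
      have h2 : (k + 1) * M ≤ T * M := Nat.mul_le_mul_right _ (by omega)
      omega
    -- the characters A samples
    set cA : Nat → Char := fun k => (pvF N (T * M)).getD (k * M + (P - 1)) '?' with hcA
    -- A's answer string is the digit stream
    have hjoin : ∀ l : List String, (PySem.Str.join "" l).toList = (l.map String.toList).flatten := by
      intro l
      simp only [PySem.Str.join, String.toList_empty, String.toList_ofList]
      exact pvJoin_flatten _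
    have hA : (solution (N : Int) (T : Int) (M : Int) (P : Int)).toList
        = (List.range T).map cA := by
      rw [solution]
      simp only [List.length_replicate, hTM]
      rw [pvNum_eq (N : Int) hn2 hn16 (T * M)]
      have hansList : (PySem.Str.join ""
          ((List.range (T * M)).map (fun i => String.ofList (pvRep (Int.toNat N) i)))).toList
          = pvF N (T * M) := by
        rw [hjoin, List.map_map]
        simp only [Function.comp_def, String.toList_ofList, Int.toNat_natCast]
        rw [pvF, List.flatMap_def]
      rw [PySem.List.pyRange_zero_natCast T, List.foldl_map]
      rw [pvFoldPush _ cA T ?hcf ""]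
      · simp
      case hcf =>
        intro k hk
        have hidx : (k : Int) * (M : Int) + ((P : Int) - 1) = ((k * M + (P - 1) : Nat) : Int) := by
          push_cast [Nat.cast_sub hP1]
          ring
        rw [hidx, PySem.Str.pyGet?_natCast, hansList]
        have hlen : k * M + (P - 1) < (pvF N (T * M)).length := by
          have := pvF_len N (T * M) hN2
          have := hgBound k hk
          omega
        rw [List.getElem?_eq_getElem hlen]
        exact congrArg some (List.getD_eq_getElem _ _ hlen).symm
    -- B's side
    have hB : (solution_alt (N : Int) (T : Int) (M : Int) (P : Int)).toList
        = (List.range T).map (fun k => pvChar N (k * M + (P - 1))) := by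
      rw [solution_alt]
      rw [PySem.List.pyRange_zero_natCast T, List.foldl_map]
      rw [PySem.List.foldl_congr_mem _ _
        (fun acc k => acc ++ [String.ofList [pvChar N (k * M + (P - 1))]]) []
        (fun acc x _ => pvBStep N M P hN2 hN16 hP1 x acc)]
      rw [PySem.List.foldl_append_singleton_eq_map]
      rw [hjoin, List.nil_append, List.map_map]
      simp only [Function.comp_def, String.toList_ofList]
      induction (List.range T) with
      | nil => rfl
      | cons x xs ihx => simp_all
    -- A's characters are B's characters
    have hmap : (List.range T).map cA = (List.range T).map (fun k => pvChar N (k * M + (P - 1))) := by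
      apply List.map_congr_left
      intro k hk
      rw [List.mem_range] at hk
      rw [hcA]
      simp only []
      rw [pvMain N (T * M) (k * M + (P - 1)) hN2 (hgBound k hk)]
      rw [pvChar]
    exact String.toList_inj.mp (hA.trans (hmap.trans hB.symm))

-- ===== VERDICT (by name: the statement is the Claim_ definition above) =====
theorem solution_spec : Claim_equal_solution := by
  intro n t m p _ hpre
  rcases hpre with ⟨hn2, hn16, hp1, hpm⟩ | ⟨ht, _⟩
  · exact pvEquiv n t m p hn2 hn16 hp1 hpm
  · show solution n t m p = solution_alt n t m p
    rw [pvTrivial n t m p ht, pvTrivial_alt n t m p ht]
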